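-- pv_equiv track=rewrite | github.com/pyssporg/pyssp_sysml2 | src/pyssp_sysml2/sysml.py | _merge_type_names
-- ===== SOURCE A (Python) =====
-- from typing import Dict, Iterable
--
-- def _merge_type_names(type_names: Iterable[str]) -> str:
--     known_type_names = [name for name in type_names if name != "Unknown"]
--     if not known_type_names:
--         return "Real"
--     if "Real" in known_type_names:
--         return "Real"
--     if "Integer" in known_type_names:
--         return "Integer"
--     if "Boolean" in known_type_names:
--         return "Boolean"
--     if "String" in known_type_names:
--         return "String"
--     return known_type_names[0]
-- ===== SOURCE B (Python) =====
-- def _merge_type_names(type_names):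
--     RANK = {"Real": 0, "Integer": 1, "Boolean": 2, "String": 3}
--     PRIORITY = ["Real", "Integer", "Boolean", "String"]
--     first = None
--     best = 4
--     for name in type_names:
--         if name == "Unknown":
--             continue
--         if first is None:
--             first = name
--         r = RANK.get(name, 4)
--         if r < best:
--             best = r
--     if first is None:
--         return "Real"
--     if best < 4:
--         return PRIORITY[best]
--     return first
-- ===== Notes on version B (the rewrite author's own statement) =====
-- stated objective: alternative
-- what changed: Replaces the filter-then-four-membership-scans structure with a single pass that tracks the first known name and the minimum priority rank from a rank table, then decodes the rank at the end.
import Mathlib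
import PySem

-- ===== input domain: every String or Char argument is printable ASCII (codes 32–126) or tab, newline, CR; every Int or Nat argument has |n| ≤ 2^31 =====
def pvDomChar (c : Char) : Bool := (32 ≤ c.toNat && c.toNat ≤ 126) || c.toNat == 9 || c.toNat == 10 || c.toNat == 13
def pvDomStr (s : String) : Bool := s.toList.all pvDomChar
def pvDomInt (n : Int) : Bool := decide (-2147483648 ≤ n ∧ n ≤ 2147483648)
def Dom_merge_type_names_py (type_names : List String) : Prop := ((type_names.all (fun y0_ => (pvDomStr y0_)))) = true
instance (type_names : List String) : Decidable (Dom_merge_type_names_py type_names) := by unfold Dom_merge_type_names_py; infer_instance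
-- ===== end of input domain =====

-- B replaces A's filter-then-four-membership-rescans with a single pass tracking the first
-- known name and the minimum rank from a priority table (alternative decomposition).


-- ===== PORT A =====
def merge_type_names_py (type_names : List String) : String :=
  let known_type_names := type_names.filter (fun name => name ≠ "Unknown")
  if known_type_names = [] then "Real"
  else if "Real" ∈ known_type_names then "Real"
  else if "Integer" ∈ known_type_names then "Integer"
  else if "Boolean" ∈ known_type_names then "Boolean"
  else if "String" ∈ known_type_names then "String"
  -- known_type_names[0]; total form is safe: guarded by the nonemptiness test above
  else (PySem.List.pyGet? known_type_names 0).getD ""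

-- ===== PORT B =====
-- RANK = {"Real": 0, "Integer": 1, "Boolean": 2, "String": 3}
def pvRANK : PySem.Dict String Int :=
  PySem.Dict.mk [("Real", 0), ("Integer", 1), ("Boolean", 2), ("String", 3)]
-- PRIORITY = ["Real", "Integer", "Boolean", "String"]
def pvPRIORITY : List String := ["Real", "Integer", "Boolean", "String"]
-- the loop body of B; state = (first, best)
def pvStepB (acc : Option String × Int) (name : String) : Option String × Int :=
  if name = "Unknown" then acc
  else
    let first := match acc.1 with | none => some name | some f => some f
    let r := PySem.Dict.getD pvRANK name 4
    (first, if r < acc.2 then r else acc.2)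
def merge_type_names_py_alt (type_names : List String) : String :=
  let st := type_names.foldl pvStepB (none, 4)
  match st.1 with
  | none => "Real"
  | some f =>
    if st.2 < 4 then (PySem.List.pyGet? pvPRIORITY st.2).getD ""  -- PRIORITY[best]; guarded: 0 ≤ best < 4
    else f

-- ===== PRECONDITION & SPEC =====
def Spec_merge_type_names_py (type_names : List String) (out : String) : Prop := out = merge_type_names_py_alt type_names
instance (type_names : List String) (out : String) : Decidable (Spec_merge_type_names_py type_names out) := by unfold Spec_merge_type_names_py; infer_instance

-- ===== CLAIM (what is proved, stated in full; the proofs are below) =====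
def Claim_equal_merge_type_names_py : Prop := ∀ (type_names : List String), Dom_merge_type_names_py type_names → Spec_merge_type_names_py type_names (merge_type_names_py type_names)

-- ===== LEMMAS AND PROOFS =====

-- rank of a name (B's dict lookup, named for the proofs)
def pvrank (a : String) : Int := PySem.Dict.getD pvRANK a 4

theorem getD_eq_pvrank (a : String) : PySem.Dict.getD pvRANK a 4 = pvrank a := rfl

-- minimum rank of a list (the value B's loop accumulates in `best`)
def pvmrr : List String → Int
  | [] => 4
  | a :: l => min (pvrank a) (pvmrr l)

theorem pvrank_cases (a : String) :
    (a = "Real" ∧ pvrank a = 0) ∨ (a = "Integer" ∧ pvrank a = 1) ∨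
    (a = "Boolean" ∧ pvrank a = 2) ∨ (a = "String" ∧ pvrank a = 3) ∨
    (a ≠ "Real" ∧ a ≠ "Integer" ∧ a ≠ "Boolean" ∧ a ≠ "String" ∧ pvrank a = 4) := by
  by_cases h1 : a = "Real"
  · subst h1; left; exact ⟨rfl, by decide⟩
  by_cases h2 : a = "Integer"
  · subst h2; right; left; exact ⟨rfl, by decide⟩
  by_cases h3 : a = "Boolean"
  · subst h3; right; right; left; exact ⟨rfl, by decide⟩
  by_cases h4 : a = "String"
  · subst h4; right; right; right; left; exact ⟨rfl, by decide⟩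
  · right; right; right; right
    refine ⟨h1, h2, h3, h4, ?_⟩
    have b1 : ("Real" == a) = false := by simpa using Ne.symm h1
    have b2 : ("Integer" == a) = false := by simpa using Ne.symm h2
    have b3 : ("Boolean" == a) = false := by simpa using Ne.symm h3
    have b4 : ("String" == a) = false := by simpa using Ne.symm h4
    simp [pvrank, pvRANK, PySem.Dict.getD, PySem.Dict.get?, List.find?, b1, b2, b3, b4]

theorem pvrank_bounds (a : String) : 0 ≤ pvrank a ∧ pvrank a ≤ 4 := by
  rcases pvrank_cases a with ⟨_, h⟩ | ⟨_, h⟩ | ⟨_, h⟩ | ⟨_, h⟩ | ⟨_, _, _, _, h⟩ <;> omega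

theorem pvmrr_bounds (l : List String) : 0 ≤ pvmrr l ∧ pvmrr l ≤ 4 := by
  induction l with
  | nil => simp [pvmrr]
  | cons a l ih => have := pvrank_bounds a; simp only [pvmrr]; omega

theorem pvmrr_le_of_mem {a : String} {l : List String} (h : a ∈ l) : pvmrr l ≤ pvrank a := by
  induction l with
  | nil => cases h
  | cons b l ih =>
    rcases List.mem_cons.mp h with rfl | h
    · simp only [pvmrr]; omega
    · have := ih h; simp only [pvmrr]; omega

theorem pvmrr_attained {l : List String} (h : pvmrr l < 4) : ∃ a ∈ l, pvrank a = pvmrr l := by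
  induction l with
  | nil => simp [pvmrr] at h
  | cons b l ih =>
    by_cases hb : pvrank b ≤ pvmrr l
    · exact ⟨b, List.mem_cons_self, by simp only [pvmrr]; omega⟩
    · have hl : pvmrr l < 4 := by simp only [pvmrr] at h; omega
      obtain ⟨a, ha, hr⟩ := ih hl
      exact ⟨a, List.mem_cons_of_mem _ ha, by simp only [pvmrr]; omega⟩

-- a fold of pvStepB whose `first` is already set just takes the min of the ranks
theorem foldB_some (l : List String) : ∀ (f : String) (b : Int), b ≤ 4 →
    l.foldl pvStepB (some f, b) = (some f, min b (pvmrr l)) := by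
  induction l with
  | nil => intro f b hb; simp only [List.foldl_nil, pvmrr]; congr 1; omega
  | cons a l ih =>
    intro f b hb
    rw [List.foldl_cons]
    by_cases hU : a = "Unknown"
    · subst hU
      have hstep : pvStepB (some f, b) "Unknown" = (some f, b) := by simp [pvStepB]
      rw [hstep, ih f b hb]
      have hm := pvmrr_bounds l
      have hr : pvrank "Unknown" = 4 := by decide
      simp only [pvmrr, hr]
      congr 1
      omega
    · simp only [pvStepB, if_neg hU, getD_eq_pvrank]
      have hra := pvrank_bounds a
      rw [ih f _ (by split_ifs <;> omega)]
      simp only [pvmrr]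
      congr 1
      split_ifs <;> omega

-- the fold skips exactly the "Unknown" entries
theorem foldB_filter_acc (l : List String) : ∀ acc,
    l.foldl pvStepB acc = (l.filter (fun name => name ≠ "Unknown")).foldl pvStepB acc := by
  induction l with
  | nil => intro acc; rfl
  | cons a l ih =>
    intro acc
    rw [List.filter_cons]
    by_cases hU : a = "Unknown"
    · subst hU
      rw [if_neg (by simp)]
      have hstep : pvStepB acc "Unknown" = acc := by simp [pvStepB]
      rw [List.foldl_cons, hstep, ih]
    · rw [if_pos (by simp [hU]), List.foldl_cons, List.foldl_cons, ih]

theorem alt_filter (ts : List String) :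
    merge_type_names_py_alt ts = merge_type_names_py_alt (ts.filter (fun name => name ≠ "Unknown")) := by
  simp only [merge_type_names_py_alt]
  rw [foldB_filter_acc]

theorem pvmrr_eq_zero_mem {l : List String} (h : pvmrr l = 0) : "Real" ∈ l := by
  obtain ⟨a, ha, hr⟩ := pvmrr_attained (l := l) (by omega)
  rcases pvrank_cases a with ⟨rfl, _⟩ | ⟨_, hv⟩ | ⟨_, hv⟩ | ⟨_, hv⟩ | ⟨_, _, _, _, hv⟩
  · exact ha
  all_goals omega

theorem pvmrr_eq_one_mem {l : List String} (h : pvmrr l = 1) : "Integer" ∈ l := by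
  obtain ⟨a, ha, hr⟩ := pvmrr_attained (l := l) (by omega)
  rcases pvrank_cases a with ⟨_, hv⟩ | ⟨rfl, _⟩ | ⟨_, hv⟩ | ⟨_, hv⟩ | ⟨_, _, _, _, hv⟩
  case inr.inl => exact ha
  all_goals omega

theorem pvmrr_eq_two_mem {l : List String} (h : pvmrr l = 2) : "Boolean" ∈ l := by
  obtain ⟨a, ha, hr⟩ := pvmrr_attained (l := l) (by omega)
  rcases pvrank_cases a with ⟨_, hv⟩ | ⟨_, hv⟩ | ⟨rfl, _⟩ | ⟨_, hv⟩ | ⟨_, _, _, _, hv⟩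
  case inr.inr.inl => exact ha
  all_goals omega

theorem pvmrr_eq_three_mem {l : List String} (h : pvmrr l = 3) : "String" ∈ l := by
  obtain ⟨a, ha, hr⟩ := pvmrr_attained (l := l) (by omega)
  rcases pvrank_cases a with ⟨_, hv⟩ | ⟨_, hv⟩ | ⟨_, hv⟩ | ⟨rfl, _⟩ | ⟨_, _, _, _, hv⟩
  case inr.inr.inr.inl => exact ha
  all_goals omega

-- main bridge: on a list without "Unknown", A's membership chain equals B
theorem chain_eq_alt (ks : List String) (hU : "Unknown" ∉ ks) :
    (if ks = [] then "Real"
     else if "Real" ∈ ks then "Real"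
     else if "Integer" ∈ ks then "Integer"
     else if "Boolean" ∈ ks then "Boolean"
     else if "String" ∈ ks then "String"
     else (PySem.List.pyGet? ks 0).getD "") = merge_type_names_py_alt ks := by
  cases ks with
  | nil => rfl
  | cons x k =>
    have hx : x ≠ "Unknown" := fun h => hU (h ▸ List.mem_cons_self)
    have hrx := pvrank_bounds x
    have hfold : (x :: k).foldl pvStepB (none, 4) = (some x, pvmrr (x :: k)) := by
      rw [List.foldl_cons]
      simp only [pvStepB, if_neg hx, getD_eq_pvrank]
      rw [foldB_some k x _ (by split_ifs <;> omega)]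
      simp only [pvmrr]
      congr 1
      split_ifs <;> omega
    simp only [merge_type_names_py_alt, hfold]
    have hm := pvmrr_bounds (x :: k)
    rw [if_neg (by simp : ¬(x :: k = []))]
    by_cases h1 : "Real" ∈ x :: k
    · rw [if_pos h1]
      have hle := pvmrr_le_of_mem h1
      rw [show pvrank "Real" = 0 by decide] at hle
      rw [show pvmrr (x :: k) = 0 by omega, if_pos (by norm_num : (0:Int) < 4)]
      decide
    · rw [if_neg h1]
      by_cases h2 : "Integer" ∈ x :: k
      · rw [if_pos h2]
        have hle := pvmrr_le_of_mem h2
        rw [show pvrank "Integer" = 1 by decide] at hle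
        have hn0 : pvmrr (x :: k) ≠ 0 := fun h => h1 (pvmrr_eq_zero_mem h)
        rw [show pvmrr (x :: k) = 1 by omega, if_pos (by norm_num : (1:Int) < 4)]
        decide
      · rw [if_neg h2]
        by_cases h3 : "Boolean" ∈ x :: k
        · rw [if_pos h3]
          have hle := pvmrr_le_of_mem h3
          rw [show pvrank "Boolean" = 2 by decide] at hle
          have hn0 : pvmrr (x :: k) ≠ 0 := fun h => h1 (pvmrr_eq_zero_mem h)
          have hn1 : pvmrr (x :: k) ≠ 1 := fun h => h2 (pvmrr_eq_one_mem h)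
          rw [show pvmrr (x :: k) = 2 by omega, if_pos (by norm_num : (2:Int) < 4)]
          decide
        · rw [if_neg h3]
          by_cases h4 : "String" ∈ x :: k
          · rw [if_pos h4]
            have hle := pvmrr_le_of_mem h4
            rw [show pvrank "String" = 3 by decide] at hle
            have hn0 : pvmrr (x :: k) ≠ 0 := fun h => h1 (pvmrr_eq_zero_mem h)
            have hn1 : pvmrr (x :: k) ≠ 1 := fun h => h2 (pvmrr_eq_one_mem h)
            have hn2 : pvmrr (x :: k) ≠ 2 := fun h => h3 (pvmrr_eq_two_mem h)
            rw [show pvmrr (x :: k) = 3 by omega, if_pos (by norm_num : (3:Int) < 4)]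
            decide
          · rw [if_neg h4]
            have hn4 : ¬ pvmrr (x :: k) < 4 := by
              intro h
              have hn0 : pvmrr (x :: k) ≠ 0 := fun hh => h1 (pvmrr_eq_zero_mem hh)
              have hn1 : pvmrr (x :: k) ≠ 1 := fun hh => h2 (pvmrr_eq_one_mem hh)
              have hn2 : pvmrr (x :: k) ≠ 2 := fun hh => h3 (pvmrr_eq_two_mem hh)
              have hn3 : pvmrr (x :: k) ≠ 3 := fun hh => h4 (pvmrr_eq_three_mem hh)
              omega
            rw [if_neg hn4]
            simp

-- ===== VERDICT (by name: the statement is the Claim_ definition above) =====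
theorem merge_type_names_py_spec : Claim_equal_merge_type_names_py := by
  intro ts _
  unfold Spec_merge_type_names_py
  have hU : "Unknown" ∉ ts.filter (fun name => name ≠ "Unknown") := by
    simp [List.mem_filter]
  calc merge_type_names_py ts
      = merge_type_names_py_alt (ts.filter (fun name => name ≠ "Unknown")) := by
        simp only [merge_type_names_py]
        exact chain_eq_alt _ hU
    _ = merge_type_names_py_alt ts := (alt_filter ts).symm
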